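-- pv_equiv track=rewrite | github.com/qloml/fafnir_ai | server.py | _summ_counts
-- ===== SOURCE A (Python) =====
-- from typing import Dict, List, Optional, Any, Tuple
--
-- _COLOR_ORDER = ["gold", "red", "orange", "yellow", "green", "blue"]
--
-- _COLOR_ICON = {"gold": "💛", "red": "🔴", "orange": "🟠", "yellow": "🟡", "green": "🟢", "blue": "🔵"}
--
-- def _summ_counts(stones: List[str]) -> str:
--     counts: Dict[str, int] = {}
--     for s in stones:
--         c = str(s).lower()
--         counts[c] = counts.get(c, 0) + 1
--     parts = []
--     for c in _COLOR_ORDER: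
--         if counts.get(c, 0) > 0:
--             parts.append(f"{_COLOR_ICON.get(c,'•')}{c.upper()}x{counts[c]}")
--     return " ".join(parts) if parts else "-"
-- ===== SOURCE B (Python) =====
-- _COLOR_ORDER = ["gold", "red", "orange", "yellow", "green", "blue"]
--
-- _COLOR_ICON = {"gold": "💛", "red": "🔴", "orange": "🟠", "yellow": "🟡", "green": "🟢", "blue": "🔵"}
--
--
-- def _rle(ranked):
--     # run-length encode a sorted list of color-order indices
--     if not ranked:
--         return []
--     r = ranked[0]
--     run = 1
--     while run < len(ranked) and ranked[run] == r:
--         run += 1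
--     c = _COLOR_ORDER[r]
--     return [f"{_COLOR_ICON.get(c, '•')}{c.upper()}x{run}"] + _rle(ranked[run:])
--
--
-- def _summ_counts(stones):
--     # sort-then-group: map each stone to its rank in _COLOR_ORDER, sort, run-length encode
--     ranked = sorted(_COLOR_ORDER.index(c)
--                     for c in (str(s).lower() for s in stones)
--                     if c in _COLOR_ORDER)
--     parts = _rle(ranked)
--     return " ".join(parts) if parts else "-"
-- ===== Notes on version B (the rewrite author's own statement) =====
-- stated objective: alternative
-- what changed: Replaces A's counting dictionary plus ordered lookups with sort-then-group: map each stone to its rank in _COLOR_ORDER, sort the ranks, and run-length encode the sorted runs into the summary entries.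
import Mathlib
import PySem

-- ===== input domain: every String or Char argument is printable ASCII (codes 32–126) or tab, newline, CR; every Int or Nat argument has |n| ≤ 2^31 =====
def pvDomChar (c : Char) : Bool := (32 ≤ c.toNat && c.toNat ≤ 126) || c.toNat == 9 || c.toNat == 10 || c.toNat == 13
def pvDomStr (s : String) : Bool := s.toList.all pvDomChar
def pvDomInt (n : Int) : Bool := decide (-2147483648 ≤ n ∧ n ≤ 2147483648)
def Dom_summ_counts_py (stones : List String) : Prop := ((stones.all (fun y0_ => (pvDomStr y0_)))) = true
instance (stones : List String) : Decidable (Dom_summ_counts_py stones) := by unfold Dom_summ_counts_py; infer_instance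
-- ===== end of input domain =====

-- B replaces A's counting dictionary with sort-then-group: map each stone to its color rank, sort, run-length encode (an alternative algorithm, same result).

def pvColorOrder : List String := ["gold", "red", "orange", "yellow", "green", "blue"]

def pvColorIcon : PySem.Dict String String :=
  PySem.Dict.ofList [("gold", "💛"), ("red", "🔴"), ("orange", "🟠"), ("yellow", "🟡"), ("green", "🟢"), ("blue", "🔵")]

-- ===== PORT A =====
def summ_counts_py (stones : List String) : String :=
  let counts : PySem.Dict String Int :=
    stones.foldl (fun d s =>
      let c := PySem.Str.lower s
      d.insert c (d.getD c 0 + 1)) PySem.Dict.empty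
  let parts : List String :=
    pvColorOrder.foldl (fun parts c =>
      if counts.getD c 0 > 0 then
        parts ++ [PySem.Str.join "" [pvColorIcon.getD c "•", PySem.Str.upper c, "x", PySem.Int.toStr (counts.getD c 0)]]
      else parts) []
  if parts = [] then "-" else PySem.Str.join " " parts

-- ===== PORT B =====
-- Source B's _rle: head, leading-run length, recurse on the remainder (the while loop counting the run is the takeWhile length; ranked[run:] is the dropWhile)
def pvRle : List Nat → List String
  | [] => []
  | r :: rest =>
    let run : Nat := (rest.takeWhile (fun x => x == r)).length + 1
    let c := pvColorOrder.getD r ""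
    PySem.Str.join "" [pvColorIcon.getD c "•", PySem.Str.upper c, "x", PySem.Int.toStr (run : Int)]
      :: pvRle (rest.dropWhile (fun x => x == r))
termination_by l => l.length
decreasing_by
  simpa using Nat.lt_succ_of_le (List.length_dropWhile_le _ _)

-- 'if c in _COLOR_ORDER' followed by '_COLOR_ORDER.index(c)' is ported as one filterMap with idxOf? (exact: first-match index, kept only when the membership test passes)
def summ_counts_py_alt (stones : List String) : String :=
  let ranked : List Nat :=
    PySem.List.sorted ((stones.map PySem.Str.lower).filterMap (fun c => pvColorOrder.idxOf? c)) (fun x => x) false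
  let parts : List String := pvRle ranked
  if parts = [] then "-" else PySem.Str.join " " parts

-- ===== PRECONDITION & SPEC =====
def Spec_summ_counts_py (stones : List String) (out : String) : Prop := out = summ_counts_py_alt stones
instance (stones : List String) (out : String) : Decidable (Spec_summ_counts_py stones out) := by unfold Spec_summ_counts_py; infer_instance

-- ===== CLAIM (what is proved, stated in full; the proofs are below) =====
def Claim_equal_summ_counts_py : Prop := ∀ (stones : List String), Dom_summ_counts_py stones → Spec_summ_counts_py stones (summ_counts_py stones)

-- ===== LEMMAS AND PROOFS =====

-- canonical form of a bounded multiset of ranks: each value's occurrences grouped, in increasing value order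
def pvCanon (cnt : Nat → Nat) (ks : List Nat) : List Nat :=
  ks.flatMap (fun k => List.replicate (cnt k) k)

-- the formatted summary entry for color rank k with count n
def pvFmt (k : Nat) (n : Int) : String :=
  PySem.Str.join "" [pvColorIcon.getD (pvColorOrder.getD k "") "•", PySem.Str.upper (pvColorOrder.getD k ""), "x", PySem.Int.toStr n]

theorem pv_count_canon (cnt : Nat → Nat) (ks : List Nat) (hnd : ks.Nodup) (x : Nat) :
    (pvCanon cnt ks).count x = if x ∈ ks then cnt x else 0 := by
  induction ks with
  | nil => simp [pvCanon]
  | cons k ks ih =>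
    rcases List.nodup_cons.1 hnd with ⟨hk, hnd'⟩
    simp only [pvCanon, List.flatMap_cons, List.count_append, List.count_replicate] at ih ⊢
    rw [ih hnd']
    by_cases hx : x = k
    · subst hx; simp [hk]
    · simp [hx, Ne.symm hx, List.mem_cons]

theorem pv_perm_canon (l : List Nat) (h6 : ∀ x ∈ l, x < 6) :
    (pvCanon l.count (List.range 6)).Perm l := by
  refine List.perm_iff_count.2 fun x => ?_
  rw [pv_count_canon _ _ (List.nodup_range) x]
  by_cases hx : x ∈ List.range 6
  · simp [hx]
  · simp only [hx, if_false]
    symm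
    rw [List.count_eq_zero]
    intro hmem
    exact hx (List.mem_range.2 (h6 x hmem))

theorem pv_pairwise_canon (cnt : Nat → Nat) (ks : List Nat) (h : ks.Pairwise (· < ·)) :
    (pvCanon cnt ks).Pairwise (· ≤ ·) := by
  induction ks with
  | nil => simp [pvCanon]
  | cons k ks ih =>
    rcases List.pairwise_cons.1 h with ⟨hk, h'⟩
    simp only [pvCanon, List.flatMap_cons]
    rw [List.pairwise_append]
    refine ⟨List.pairwise_replicate.2 (Or.inr le_rfl), ih h', ?_⟩
    intro a ha b hb
    rcases List.eq_of_mem_replicate ha with rfl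
    rcases List.mem_flatMap.1 hb with ⟨j, hj, hbj⟩
    rcases List.eq_of_mem_replicate hbj with rfl
    exact le_of_lt (hk _ hj)

theorem pv_sorted_eq_canon (l : List Nat) (h6 : ∀ x ∈ l, x < 6) :
    PySem.List.sorted l (fun x => x) false = pvCanon l.count (List.range 6) := by
  have hlt : (List.range 6).Pairwise (· < ·) := by decide
  exact PySem.List.sorted_id_eq_of_perm_of_pairwise _ _ (pv_perm_canon l h6) (pv_pairwise_canon _ _ hlt)

-- run-length encoding of the canonical form: one formatted entry per rank with a positive count, in rank order
theorem pv_rle_canon (cnt : Nat → Nat) (ks : List Nat) (h : ks.Pairwise (· < ·)) :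
    pvRle (pvCanon cnt ks) = ks.filterMap (fun k => if cnt k > 0 then some (pvFmt k ((cnt k : Int))) else none) := by
  induction ks with
  | nil => simp [pvCanon, pvRle]
  | cons k ks ih =>
    rcases List.pairwise_cons.1 h with ⟨hk, h'⟩
    have hT : ∀ x ∈ pvCanon cnt ks, k < x := by
      intro x hx
      rcases List.mem_flatMap.1 hx with ⟨j, hj, hxj⟩
      rcases List.eq_of_mem_replicate hxj with rfl
      exact hk _ hj
    have hTne : ∀ x ∈ pvCanon cnt ks, (x == k) = false := by
      intro x hx
      simpa using Nat.ne_of_gt (hT x hx)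
    rw [show pvCanon cnt (k :: ks) = List.replicate (cnt k) k ++ pvCanon cnt ks from rfl,
      List.filterMap_cons]
    cases hc : cnt k with
    | zero =>
      simp only [List.replicate_zero, List.nil_append, gt_iff_lt, Nat.lt_irrefl, if_false]
      exact ih h'
    | succ n =>
      rw [List.replicate_succ, List.cons_append]
      rw [pvRle]
      have htake : List.takeWhile (fun x => x == k) (List.replicate n k ++ pvCanon cnt ks)
          = List.replicate n k ++ List.takeWhile (fun x => x == k) (pvCanon cnt ks) :=
        List.takeWhile_append_of_pos (by intro a ha; simp [List.eq_of_mem_replicate ha])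
      have htake2 : List.takeWhile (fun x => x == k) (pvCanon cnt ks) = [] := by
        rw [List.takeWhile_eq_nil_iff]
        intro hl
        have := hTne _ (List.getElem_mem hl)
        simpa using this
      have hdrop : List.dropWhile (fun x => x == k) (List.replicate n k ++ pvCanon cnt ks)
          = pvCanon cnt ks := by
        rw [List.dropWhile_append_of_pos (by intro a ha; simp [List.eq_of_mem_replicate ha])]
        rw [List.dropWhile_eq_self_iff]
        intro hl
        have := hTne _ (List.getElem_mem hl)
        simpa using this
      rw [htake, htake2, hdrop, ih h']
      simp [pvFmt]

-- the count of rank k among the kept ranks is the count of the k-th color among the normalized stones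
theorem pv_count_ranks (l : List String) (k : Nat) (hk : k < 6) :
    ((l.filterMap (fun c => pvColorOrder.idxOf? c)).count k) = l.count (pvColorOrder.getD k "") := by
  have hklen : k < pvColorOrder.length := by simpa [pvColorOrder] using hk
  have hgetD : pvColorOrder.getD k "" = pvColorOrder[k] := List.getD_eq_getElem _ _ hklen
  have hgetD' : pvColorOrder[k]?.getD "" = pvColorOrder[k] := by rw [List.getElem?_eq_getElem hklen]; rfl
  have hnd : pvColorOrder.Nodup := by decide
  induction l with
  | nil => rfl
  | cons a l ih =>
    cases h : List.idxOf? a pvColorOrder with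
    | none =>
      have hne : a ≠ pvColorOrder.getD k "" := by
        intro heq
        have : List.idxOf? a pvColorOrder = some k := by
          rw [List.idxOf?_eq_some_iff]
          refine ⟨hklen, by rw [← hgetD, ← heq], ?_⟩
          intro j hj heq2
          have : j = k := (List.Nodup.getElem_inj_iff hnd).1 (by rw [heq2, ← hgetD, ← heq])
          omega
        simp [h] at this
      simp only [List.filterMap_cons, h, List.count_cons]
      rw [ih]
      have hne1 : ¬ a = pvColorOrder[k] := fun hh => hne (by rw [hgetD]; exact hh)
      simp [hgetD', hne1]
    | some j =>
      rcases List.idxOf?_eq_some_iff.1 h with ⟨hj, hja, _⟩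
      have hiff : (j = k) ↔ (a = pvColorOrder.getD k "") := by
        constructor
        · rintro rfl; rw [hgetD, hja]
        · intro heq
          exact (List.Nodup.getElem_inj_iff hnd).1 (by rw [hja, heq, hgetD])
      simp only [List.filterMap_cons, h, List.count_cons]
      rw [ih]
      by_cases hjk : j = k
      · simp [hjk, hiff.1 hjk]
      · have hne2 : ¬ a = pvColorOrder[k] := fun hh => hjk (hiff.2 (by rw [hgetD]; exact hh))
        simp [hjk, hgetD', hne2]

theorem pv_filterMap_ite (ks : List Nat) (p : Nat → Prop) [DecidablePred p] (f : Nat → String) :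
    ks.filterMap (fun k => if p k then some (f k) else none)
      = (ks.filter (fun k => decide (p k))).map f := by
  induction ks with
  | nil => rfl
  | cons k ks ih =>
    by_cases hp : p k <;> simp [hp, ih]

-- A's counting dict looks up to exactly the count of the color in the normalized list
theorem pv_getD_eq_count (stones : List String) (c : String) :
    (stones.foldl (fun d s =>
      let x := PySem.Str.lower s
      d.insert x (d.getD x 0 + 1)) (PySem.Dict.empty : PySem.Dict String Int)).getD c 0
    = ((stones.map PySem.Str.lower).count c : Int) := by
  show (stones.foldl
      (fun (d : PySem.Dict String Int) s =>
        d.insert (PySem.Str.lower s) (d.getD (PySem.Str.lower s) 0 + 1)) PySem.Dict.empty).getD c 0 = _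
  rw [← List.foldl_map (f := PySem.Str.lower)
      (g := fun (d : PySem.Dict String Int) x => d.insert x (d.getD x 0 + 1)),
    PySem.Dict.getD_foldl_insert_add_one]
  simp [PySem.Dict.getD_empty]

theorem pv_main (stones : List String) : summ_counts_py stones = summ_counts_py_alt stones := by
  unfold summ_counts_py summ_counts_py_alt
  simp only [pv_getD_eq_count]
  set N := stones.map PySem.Str.lower with hN
  set ranks := N.filterMap (fun c => pvColorOrder.idxOf? c) with hranks
  have h6 : ∀ x ∈ ranks, x < 6 := by
    intro x hx
    rcases List.mem_filterMap.1 hx with ⟨c, _, hc⟩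
    rcases List.idxOf?_eq_some_iff.1 hc with ⟨hj, _, _⟩
    simpa [pvColorOrder] using hj
  have hBparts : pvRle (PySem.List.sorted ranks (fun x => x) false)
      = (List.range 6).filterMap (fun k => if ranks.count k > 0 then some (pvFmt k ((ranks.count k : Int))) else none) := by
    rw [pv_sorted_eq_canon ranks h6, pv_rle_canon ranks.count (List.range 6) (by decide)]
  have hcount : ∀ k ∈ List.range 6, ranks.count k = N.count (pvColorOrder.getD k "") := by
    intro k hk
    exact pv_count_ranks N k (List.mem_range.1 hk)
  have hBparts2 : pvRle (PySem.List.sorted ranks (fun x => x) false)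
      = (List.range 6).filterMap (fun k => if N.count (pvColorOrder.getD k "") > 0 then some (pvFmt k ((N.count (pvColorOrder.getD k "") : Int))) else none) := by
    rw [hBparts]
    exact List.filterMap_congr (fun k hk => by rw [hcount k hk])
  have hAparts :
      pvColorOrder.foldl (fun parts c =>
        if ((N.count c : Int)) > 0 then
          parts ++ [PySem.Str.join "" [pvColorIcon.getD c "•", PySem.Str.upper c, "x", PySem.Int.toStr ((N.count c : Int))]]
        else parts) []
      = (List.range 6).filterMap (fun k => if N.count (pvColorOrder.getD k "") > 0 then some (pvFmt k ((N.count (pvColorOrder.getD k "") : Int))) else none) := by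
    have hcolor : pvColorOrder = (List.range 6).map (fun k => pvColorOrder.getD k "") := rfl
    conv_lhs => rw [hcolor, List.foldl_map]
    rw [PySem.List.foldl_append_ite (p := fun k => ((N.count (pvColorOrder.getD k "") : Int)) > 0)
        (f := fun k => PySem.Str.join "" [pvColorIcon.getD (pvColorOrder.getD k "") "•", PySem.Str.upper (pvColorOrder.getD k ""), "x", PySem.Int.toStr ((N.count (pvColorOrder.getD k "") : Int))]),
      pv_filterMap_ite (List.range 6) (fun k => N.count (pvColorOrder.getD k "") > 0)
        (fun k => pvFmt k ((N.count (pvColorOrder.getD k "") : Int)))]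
    simp [pvFmt, gt_iff_lt, Int.natCast_pos]
  rw [hBparts2, ← hAparts]

-- ===== VERDICT (by name: the statement is the Claim_ definition above) =====
theorem summ_counts_py_spec : Claim_equal_summ_counts_py := by
  intro stones _
  exact pv_main stones
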